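-- pv_equiv track=rewrite | github.com/mzen17/Character-Neural-Engine | src/sxcne/utilities.py | slash_sentences
-- ===== SOURCE A (Python) =====
-- def slash_sentences(sentence):
--     last = 0
--     for i in range(len(sentence)):
--         if sentence[i] == "." or sentence[i] == "?" or sentence[i] == "!":
--             last = i
--         if sentence[i] == ":":
--             sentence = sentence[:last+1]
--             break
--     return sentence
-- ===== SOURCE B (Python) =====
-- def slash_sentences(sentence):
--     c = sentence.find(':')
--     if c == -1:
--         return sentence
--     prefix = sentence[:c]
--     p = max(prefix.rfind('.'), prefix.rfind('?'), prefix.rfind('!'))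
--     if p == -1:
--         p = 0
--     return sentence[:p + 1]
-- ===== Notes on version B (the rewrite author's own statement) =====
-- stated objective: idiomatic
-- what changed: Replaces the single forward character loop that tracks the last punctuation index with a find of the first colon followed by rfind-based backward searches restricted to the prefix before it.
import Mathlib
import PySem

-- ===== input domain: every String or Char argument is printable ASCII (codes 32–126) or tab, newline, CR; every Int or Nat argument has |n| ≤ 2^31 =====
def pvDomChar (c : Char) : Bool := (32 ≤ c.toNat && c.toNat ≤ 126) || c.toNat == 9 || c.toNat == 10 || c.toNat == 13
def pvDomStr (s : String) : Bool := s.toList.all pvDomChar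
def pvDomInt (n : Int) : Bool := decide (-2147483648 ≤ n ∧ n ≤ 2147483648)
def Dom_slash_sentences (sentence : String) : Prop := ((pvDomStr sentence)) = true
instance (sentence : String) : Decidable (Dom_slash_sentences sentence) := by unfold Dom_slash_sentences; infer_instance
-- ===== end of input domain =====

-- B replaces A's single forward loop (tracking the last sentence-ending punctuation index)
-- by finding the first colon and then rfind-searching only the prefix before it: idiomatic.

-- ===== PORT A =====
-- the for-loop of A: scans char by char with index i and accumulator `last`;
-- on ':' it truncates the original string to last+1 (sentence[:last+1] with last+1 ≥ 0 is `take`)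
-- and breaks; if the loop finishes, the string is returned unchanged.
def slashLoopA (orig : List Char) : Nat → Nat → List Char → List Char
  | _, _, [] => orig
  | i, last, c :: rest =>
      let last' := if c = '.' ∨ c = '?' ∨ c = '!' then i else last
      if c = ':' then orig.take (last' + 1)
      else slashLoopA orig (i + 1) last' rest

def slash_sentences (sentence : String) : String :=
  String.ofList (slashLoopA sentence.toList 0 0 sentence.toList)

-- ===== PORT B =====
-- hand port of str.rfind(ch): index of the last occurrence, -1 if absent (exact for 1-char needles)
def rfindChar : List Char → Char → Int
  | [], _ => -1
  | x :: xs, c =>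
      let r := rfindChar xs c
      if r ≥ 0 then r + 1 else if x = c then 0 else -1

def slash_sentences_alt (sentence : String) : String :=
  let l := sentence.toList
  -- sentence.find(':') : index of first ':' (hand port, exact for a 1-char needle)
  match l.findIdx? (· = ':') with
  | none => sentence
  | some c =>
    let pre := l.take c                 -- prefix = sentence[:c]
    let p0 := max (max (rfindChar pre '.') (rfindChar pre '?')) (rfindChar pre '!')
    let p := if p0 = -1 then 0 else p0
    String.ofList (l.take (p + 1).toNat)    -- sentence[:p+1], p ≥ 0

-- ===== PRECONDITION & SPEC =====
def Spec_slash_sentences (sentence : String) (out : String) : Prop := out = slash_sentences_alt sentence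
instance (sentence : String) (out : String) : Decidable (Spec_slash_sentences sentence out) := by unfold Spec_slash_sentences; infer_instance

-- ===== CLAIM (what is proved, stated in full; the proofs are below) =====
def Claim_equal_slash_sentences : Prop := ∀ (sentence : String), Dom_slash_sentences sentence → Spec_slash_sentences sentence (slash_sentences sentence)

-- ===== LEMMAS AND PROOFS =====

-- index of the last '.'/'?'/'!' in a list, -1 if none
def lastPunctI : List Char → Int
  | [] => -1
  | x :: xs =>
      if lastPunctI xs ≥ 0 then lastPunctI xs + 1
      else if x = '.' ∨ x = '?' ∨ x = '!' then 0 else -1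

lemma rfindChar_ge (l : List Char) (c : Char) : rfindChar l c ≥ -1 := by
  induction l with
  | nil => simp [rfindChar]
  | cons x xs ih => simp only [rfindChar]; split_ifs <;> omega

lemma lastPunctI_ge (l : List Char) : lastPunctI l ≥ -1 := by
  induction l with
  | nil => simp [lastPunctI]
  | cons x xs ih => simp only [lastPunctI]; split_ifs <;> omega

-- the three rfinds of B combine to the last punctuation index
lemma tri_rfind (l : List Char) :
    max (max (rfindChar l '.') (rfindChar l '?')) (rfindChar l '!') = lastPunctI l := by
  induction l with
  | nil => simp [rfindChar, lastPunctI]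
  | cons x xs ih =>
      have h1 := rfindChar_ge xs '.'
      have h2 := rfindChar_ge xs '?'
      have h3 := rfindChar_ge xs '!'
      simp only [rfindChar, lastPunctI, ← ih]
      generalize rfindChar xs '.' = r1 at *
      generalize rfindChar xs '?' = r2 at *
      generalize rfindChar xs '!' = r3 at *
      split_ifs <;> first | rfl | omega | tauto

-- characterisation of A's loop in terms of the first colon and lastPunctI of the prefix
lemma slashLoopA_eq (l : List Char) : ∀ (orig : List Char) (i last : Nat),
    slashLoopA orig i last l =
      match l.findIdx? (· = ':') with
      | none => orig
      | some j =>
          orig.take ((if lastPunctI (l.take j) ≥ 0 then i + (lastPunctI (l.take j)).toNat else last) + 1) := by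
  induction l with
  | nil => intro orig i last; simp [slashLoopA]
  | cons c rest ih =>
      intro orig i last
      by_cases hc : c = ':'
      · subst hc
        simp [slashLoopA, List.findIdx?_cons, lastPunctI]
      · have hfind : (c :: rest).findIdx? (· = ':') =
            (rest.findIdx? (· = ':')).map (· + 1) := by
          simp [List.findIdx?_cons, hc]
        by_cases hp : c = '.' ∨ c = '?' ∨ c = '!'
        · simp only [slashLoopA, if_pos hp, if_neg hc, ih, hfind]
          cases hrest : rest.findIdx? (· = ':') with
          | none => simp
          | some j =>
              simp only [Option.map_some, List.take_succ_cons, lastPunctI, if_pos hp]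
              have := lastPunctI_ge (rest.take j)
              split_ifs <;> simp_all <;> omega
        · simp only [slashLoopA, if_neg hp, if_neg hc, ih, hfind]
          cases hrest : rest.findIdx? (· = ':') with
          | none => simp
          | some j =>
              simp only [Option.map_some, List.take_succ_cons, lastPunctI, if_neg hp]
              have := lastPunctI_ge (rest.take j)
              split_ifs <;> simp_all <;> omega

-- ===== VERDICT (by name: the statement is the Claim_ definition above) =====
theorem slash_sentences_spec : Claim_equal_slash_sentences := by
  intro s _
  unfold Spec_slash_sentences slash_sentences slash_sentences_alt
  rw [slashLoopA_eq]
  cases h : s.toList.findIdx? (· = ':') with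
  | none => simp [h, String.ofList_toList]
  | some j =>
      simp only [h]
      have htri := tri_rfind (s.toList.take j)
      have hge := lastPunctI_ge (s.toList.take j)
      by_cases h0 : lastPunctI (s.toList.take j) ≥ 0
      · have hne : lastPunctI (s.toList.take j) ≠ -1 := by omega
        simp only [htri, if_pos h0, if_neg hne]
        congr 2
        omega
      · have heq : lastPunctI (s.toList.take j) = -1 := by omega
        simp [htri, heq]
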